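-- pv_equiv track=rewrite | github.com/MrBrantCode/unitest_baseline | mut_generate/mist_train_taco/taco_13181/solution.py | is_good_string
-- ===== SOURCE A (Python) =====
-- def is_good_string(s: str) -> str:
--     vowels = {'A', 'E', 'I', 'O', 'U'}
--
--     # Check for at least 3 consecutive vowels
--     consecutive_vowels = False
--     for i in range(len(s) - 2):
--         if s[i] in vowels and s[i + 1] in vowels and s[i + 2] in vowels:
--             consecutive_vowels = True
--             break
--
--     if not consecutive_vowels:
--         return "-1"
--
--     # Remove vowels and count distinct consonants
--     consonants = set(s) - vowels
--     if len(consonants) >= 5: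
--         return "GOOD"
--     else:
--         return "-1"
-- ===== SOURCE B (Python) =====
-- def is_good_string(s: str) -> str:
--     vowels = "AEIOU"
--     # Mask the string: vowels become '*', everything else '.', then the
--     # consecutive-vowel test is a plain substring search for "***".
--     marked = "".join("*" if c in vowels else "." for c in s)
--     if "***" not in marked:
--         return "-1"
--     consonants = {c for c in s if c not in vowels}
--     return "GOOD" if len(consonants) >= 5 else "-1"
-- ===== Notes on version B (the rewrite author's own statement) =====
-- stated objective: alternative
-- what changed: Replaces A's index-window scan (for each i, test s[i], s[i+1], s[i+2]) by masking the string (star for vowels, dot otherwise) and doing a substring search for a run of three stars, and builds the consonant set with a filtered set comprehension instead of A's set-difference from set(s).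
import Mathlib
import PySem

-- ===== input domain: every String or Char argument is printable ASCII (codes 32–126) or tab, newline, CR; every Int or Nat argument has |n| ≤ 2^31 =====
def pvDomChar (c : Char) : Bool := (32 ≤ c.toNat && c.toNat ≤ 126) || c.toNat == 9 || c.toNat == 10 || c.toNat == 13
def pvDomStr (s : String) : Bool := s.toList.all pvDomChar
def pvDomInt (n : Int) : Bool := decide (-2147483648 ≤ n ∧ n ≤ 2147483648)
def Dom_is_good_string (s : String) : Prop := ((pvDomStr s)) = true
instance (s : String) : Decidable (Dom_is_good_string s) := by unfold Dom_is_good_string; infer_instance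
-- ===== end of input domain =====

-- B replaces A's index-window vowel scan by masking the string ('*' for vowels, '.' otherwise)
-- and searching for a three-star substring, and builds the consonant set by a filtered set
-- comprehension instead of set difference; same asymptotic cost, different mechanism.

def pvVowel (c : Char) : Bool := c == 'A' || c == 'E' || c == 'I' || c == 'O' || c == 'U'

-- ===== PORT A =====
-- A's loop over range(len(s)-2) testing the window s[i], s[i+1], s[i+2]; the break only
-- stops early, the resulting flag is `any`. Indices are always in range, so getD is exact.
def pvAWin (cs : List Char) : Bool :=
  (List.range (cs.length - 2)).any (fun i =>
    pvVowel (cs.getD i ' ') && pvVowel (cs.getD (i + 1) ' ') && pvVowel (cs.getD (i + 2) ' '))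

def is_good_string (s : String) : String :=
  let cs := s.toList
  let consecutive_vowels := pvAWin cs
  if !consecutive_vowels then "-1"
  else
    let consonants := PySem.Set.diff (PySem.Set.ofList cs) ['A', 'E', 'I', 'O', 'U']
    if 5 ≤ PySem.Set.len consonants then "GOOD" else "-1"

-- ===== PORT B =====
-- Source B: mask each char ('*' if vowel else '.'), then the triple-vowel test is a substring search for three stars.
def pvMark (c : Char) : Char := if pvVowel c then '*' else '.'

def is_good_string_alt (s : String) : String :=
  let cs := s.toList
  let marked := cs.map pvMark
  if !(PySem.Chars.isIn ['*', '*', '*'] marked) then "-1"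
  else
    let consonants := PySem.Set.ofList (cs.filter (fun c => !pvVowel c))
    if 5 ≤ PySem.Set.len consonants then "GOOD" else "-1"

-- ===== PRECONDITION & SPEC =====
def Spec_is_good_string (s : String) (out : String) : Prop := out = is_good_string_alt s
instance (s : String) (out : String) : Decidable (Spec_is_good_string s out) := by unfold Spec_is_good_string; infer_instance

-- ===== CLAIM (what is proved, stated in full; the proofs are below) =====
def Claim_equal_is_good_string : Prop := ∀ (s : String), Dom_is_good_string s → Spec_is_good_string s (is_good_string s)

-- ===== LEMMAS AND PROOFS =====

-- structural-recursion form of "some window of 3 consecutive vowels"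
def threeRec : List Char → Bool
  | a :: b :: c :: r => (pvVowel a && pvVowel b && pvVowel c) || threeRec (b :: c :: r)
  | _ => false

-- A's window scan equals threeRec
lemma pvAWin_eq : ∀ (cs : List Char), pvAWin cs = threeRec cs
  | [] => by simp [pvAWin, threeRec]
  | [a] => by simp [pvAWin, threeRec]
  | [a, b] => by simp [pvAWin, threeRec]
  | a :: b :: c :: r => by
    have ih := pvAWin_eq (b :: c :: r)
    rw [pvAWin] at ih ⊢
    simp only [List.length_cons] at ih ⊢
    rw [show r.length + 1 + 1 + 1 - 2 = (r.length + 1 + 1 - 2) + 1 from by omega,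
      List.range_succ_eq_map, List.any_cons, List.any_map]
    rw [threeRec, ← ih]
    congr 1

lemma pvMark_eq_star (c : Char) : (pvMark c = '*') ↔ pvVowel c = true := by
  unfold pvMark; split <;> simp_all

-- B's substring search equals threeRec
lemma mark_infix : ∀ (cs : List Char),
    PySem.Chars.isIn ['*', '*', '*'] (cs.map pvMark) = threeRec cs
  | [] => by
    apply Bool.eq_iff_iff.mpr
    rw [PySem.Chars.isIn_iff_infix]
    simp [threeRec]
  | [a] => by
    apply Bool.eq_iff_iff.mpr
    rw [PySem.Chars.isIn_iff_infix]
    constructor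
    · intro h; have := h.length_le; simp at this
    · intro h; simp [threeRec] at h
  | [a, b] => by
    apply Bool.eq_iff_iff.mpr
    rw [PySem.Chars.isIn_iff_infix]
    constructor
    · intro h; have := h.length_le; simp at this
    · intro h; simp [threeRec] at h
  | a :: b :: c :: r => by
    have ih := mark_infix (b :: c :: r)
    apply Bool.eq_iff_iff.mpr
    rw [PySem.Chars.isIn_iff_infix]
    rw [List.map_cons, List.infix_cons_iff, threeRec]
    constructor
    · rintro (hp | hi)
      · rcases hp with ⟨t, ht⟩
        simp only [List.map_cons, List.cons_append, List.cons.injEq] at ht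
        obtain ⟨ha, hb, hc, -⟩ := ht
        simp [(pvMark_eq_star a).mp ha.symm,
          (pvMark_eq_star b).mp hb.symm, (pvMark_eq_star c).mp hc.symm]
      · rw [← PySem.Chars.isIn_iff_infix, ih] at hi
        simp [hi]
    · intro h
      rcases Bool.or_eq_true_iff.mp h with hw | ht
      · simp only [Bool.and_eq_true] at hw
        obtain ⟨⟨ha, hb⟩, hc⟩ := hw
        left
        refine ⟨r.map pvMark, ?_⟩
        simp [(pvMark_eq_star a).mpr ha, (pvMark_eq_star b).mpr hb, (pvMark_eq_star c).mpr hc]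
      · right
        rw [← PySem.Chars.isIn_iff_infix, ih]
        exact ht

-- filtering commutes with the set-building fold
lemma filter_add (acc : List Char) (a : Char) (q : Char → Bool) :
    (PySem.Set.add acc a).filter q = if q a then PySem.Set.add (acc.filter q) a else acc.filter q := by
  unfold PySem.Set.add PySem.Set.contains
  by_cases hm : a ∈ acc
  · rw [if_pos (by simpa using hm)]
    by_cases hq : q a = true
    · rw [if_pos hq, if_pos (by simp [List.mem_filter, hm, hq])]
    · simp [hq]
  · rw [if_neg (by simpa using hm)]
    by_cases hq : q a = true
    · rw [if_pos hq, if_neg (by simp [List.mem_filter, hm]), List.filter_append]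
      simp [hq]
    · simp [List.filter_append, hq]

lemma foldl_add_filter : ∀ (l acc : List Char) (q : Char → Bool),
    (l.foldl PySem.Set.add acc).filter q = (l.filter q).foldl PySem.Set.add (acc.filter q)
  | [], acc, q => rfl
  | a :: l, acc, q => by
    rw [List.foldl_cons, foldl_add_filter l (PySem.Set.add acc a) q, filter_add]
    by_cases hq : q a = true
    · rw [if_pos hq, List.filter_cons_of_pos hq, List.foldl_cons]
    · rw [if_neg hq, List.filter_cons_of_neg hq]

lemma ofList_eq_foldl' (l : List Char) : PySem.Set.ofList l = l.foldl PySem.Set.add [] := rfl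

lemma consonants_eq (cs : List Char) :
    PySem.Set.diff (PySem.Set.ofList cs) ['A', 'E', 'I', 'O', 'U']
      = PySem.Set.ofList (cs.filter (fun c => !pvVowel c)) := by
  show (PySem.Set.ofList cs).filter _ = _
  rw [ofList_eq_foldl', ofList_eq_foldl',
    foldl_add_filter cs [] (fun x => !PySem.Set.contains ['A', 'E', 'I', 'O', 'U'] x)]
  congr 1
  apply List.filter_congr
  intro x _
  apply Bool.eq_iff_iff.mpr
  simp [PySem.Set.contains, pvVowel]
  tauto

-- ===== VERDICT (by name: the statement is the Claim_ definition above) =====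
theorem is_good_string_spec : Claim_equal_is_good_string := by
  intro s _
  unfold Spec_is_good_string
  simp only [is_good_string, is_good_string_alt, pvAWin_eq, mark_infix, consonants_eq]
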